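-- pv_equiv track=rewrite | github.com/will-gebbie/BioMi696 | bwt.py | create_index_matrix
-- ===== SOURCE A (Python) =====
-- def create_index_matrix(seq):
--     str_T = '$' + str(seq)
--     list_T = []
--     for char in str_T:
--         list_T.append(char)
--
--     index_matrix = ['' for i in range(len(list_T))]
--     for i in range(len(list_T) - 1, -1, -1):
--         index_matrix[i] = str_T
--         left_dollar = list_T[:len(list_T) - 1]
--         right_dollar = list_T[len(list_T) - 1:]
--         list_T = right_dollar + left_dollar
--         str_T = ''.join(list_T)
--
--     return index_matrix
-- ===== SOURCE B (Python) =====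
-- def create_index_matrix(seq):
--     s = '$' + str(seq)
--     return [s[i + 1:] + s[:i + 1] for i in range(len(s))]
-- ===== Notes on version B (the rewrite author's own statement) =====
-- stated objective: simpler
-- what changed: Replaces A's backwards index loop that mutates a char list (moving the last char to the front, rebuilding the list and re-joining it each step) with a direct comprehension producing each rotation by slicing s[i+1:]+s[:i+1].
import Mathlib
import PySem

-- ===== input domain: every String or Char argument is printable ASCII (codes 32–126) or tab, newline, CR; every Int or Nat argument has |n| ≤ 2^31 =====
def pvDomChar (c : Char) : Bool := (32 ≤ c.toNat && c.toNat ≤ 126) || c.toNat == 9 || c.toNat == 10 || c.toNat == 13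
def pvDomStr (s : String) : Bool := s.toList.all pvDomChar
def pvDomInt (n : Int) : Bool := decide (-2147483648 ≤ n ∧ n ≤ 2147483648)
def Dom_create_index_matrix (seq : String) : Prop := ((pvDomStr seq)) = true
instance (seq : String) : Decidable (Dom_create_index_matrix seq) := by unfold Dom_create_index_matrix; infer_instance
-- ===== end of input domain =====

-- B replaces A's mutate-rotate-and-join loop by a direct slicing comprehension (simpler).

-- ===== PORT A =====
-- body of A's second for-loop (index_matrix[i] = str_T; rotate list_T right by one; re-join)
def cimStep (st : List String × List Char × String) (i : Int) :
    List String × List Char × String :=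
  let m := st.1
  let lT := st.2.1
  let sT := st.2.2
  let m' := m.set i.toNat sT
  let left_dollar := PySem.List.slice lT none (some ((lT.length : Int) - 1))
  let right_dollar := PySem.List.slice lT (some ((lT.length : Int) - 1)) none
  let lT' := right_dollar ++ left_dollar
  (m', lT', String.ofList lT')

def create_index_matrix (seq : String) : List String :=
  let str_T : String := String.ofList ('$' :: seq.toList)        -- '$' + str(seq)
  let list_T : List Char := str_T.toList.foldl (fun acc c => acc ++ [c]) []   -- append loop
  let index_matrix : List String := (List.range list_T.length).map (fun _ => "")
  ((PySem.List.pyRange ((list_T.length : Int) - 1) (-1) (-1)).foldl cimStep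
      (index_matrix, list_T, str_T)).1

-- ===== PORT B =====
def create_index_matrix_alt (seq : String) : List String :=
  let s : List Char := '$' :: seq.toList                         -- '$' + str(seq)
  (List.range s.length).map (fun i => String.ofList (s.drop (i + 1) ++ s.take (i + 1)))

-- ===== PRECONDITION & SPEC =====
def Spec_create_index_matrix (seq : String) (out : List String) : Prop := out = create_index_matrix_alt seq
instance (seq : String) (out : List String) : Decidable (Spec_create_index_matrix seq out) := by unfold Spec_create_index_matrix; infer_instance

-- ===== CLAIM (what is proved, stated in full; the proofs are below) =====
def Claim_equal_create_index_matrix : Prop := ∀ (seq : String), Dom_create_index_matrix seq → Spec_create_index_matrix seq (create_index_matrix seq)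

-- ===== LEMMAS AND PROOFS =====

-- rotate right by one (what one pass of A's loop does to list_T)
def rotr (l : List Char) : List Char := l.drop (l.length - 1) ++ l.take (l.length - 1)

theorem cimStep_eq (m : List String) (lT : List Char) (sT : String) (i : Int) :
    cimStep (m, lT, sT) i = (m.set i.toNat sT, rotr lT, String.ofList (rotr lT)) := by
  rcases lT with _ | ⟨c, cs⟩
  · simp [cimStep, rotr, PySem.List.slice]
  · have h0 : (0 : Int) ≤ ((c :: cs).length : Int) - 1 := by simp only [List.length_cons]; push_cast; omega
    have hb : (((c :: cs).length : Int) - 1).toNat = (c :: cs).length - 1 := by omega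
    simp only [cimStep, PySem.List.slice_to _ h0, PySem.List.slice_from _ h0, hb, rotr]

theorem foldl_app_singleton (l : List Char) (acc : List Char) :
    l.foldl (fun a c => a ++ [c]) acc = acc ++ l := by
  induction l generalizing acc with
  | nil => simp
  | cons c cs ih => simp [List.foldl_cons, ih]

theorem drop_set_self {α : Type} (m : List α) (j : ℕ) (x : α) (h : j < m.length) :
    (m.set j x).drop j = x :: m.drop (j + 1) := by
  rw [List.drop_eq_getElem_cons (by simpa using h)]
  simp [List.drop_set]

theorem rotr_split (l : List Char) (a : ℕ) (h1 : 1 ≤ a) (h2 : a ≤ l.length) :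
    rotr (l.drop a ++ l.take a) = l.drop (a - 1) ++ l.take (a - 1) := by
  have hlen : (l.drop a ++ l.take a).length = l.length := by
    simp; omega
  have hd : l.drop (a - 1) = (l.take a).drop (a - 1) ++ l.drop a := by
    conv_lhs => rw [← List.take_append_drop a l]
    rw [List.drop_append]
    have : a - 1 - (l.take a).length = 0 := by simp; omega
    rw [this, List.drop_zero]
  rw [rotr, hlen]
  rw [List.drop_append, List.take_append]
  have h3 : (l.drop a).drop (l.length - 1) = [] := by
    apply List.drop_eq_nil_of_le; simp; omega
  have h4 : (l.drop a).take (l.length - 1) = l.drop a := by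
    apply List.take_of_length_le; simp; omega
  have h5 : l.length - 1 - (l.drop a).length = a - 1 := by simp; omega
  have h6 : (l.take a).take (a - 1) = l.take (a - 1) := by
    rw [List.take_take]; congr 1; omega
  rw [h3, h4, h5, h6, hd]
  simp

theorem rotr_iter (l : List Char) (k : ℕ) (hk : k ≤ l.length) :
    rotr^[k] l = l.drop (l.length - k) ++ l.take (l.length - k) := by
  induction k with
  | zero => simp
  | succ k ih =>
    rw [Function.iterate_succ_apply', ih (by omega)]
    rw [rotr_split l (l.length - k) (by omega) (by omega)]
    have hidx : l.length - k - 1 = l.length - (k + 1) := by omega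
    rw [hidx]

-- the descending index list range(j-1, -1, -1)
def descIdx (j : ℕ) : List Int := (List.range j).map (fun (k : ℕ) => ((j : Int) - 1) - (k : Int))

theorem descIdx_succ (j : ℕ) : descIdx (j + 1) = (j : Int) :: descIdx j := by
  unfold descIdx
  rw [List.range_succ_eq_map, List.map_cons, List.map_map]
  congr 1
  · push_cast; ring
  · apply List.map_congr_left
    intro k _
    simp only [Function.comp_apply, Nat.succ_eq_add_one]
    push_cast; ring

theorem loopA (j : ℕ) : ∀ (m : List String) (lT : List Char), j ≤ m.length →
    ((descIdx j).foldl cimStep (m, lT, String.ofList lT)).1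
      = (List.range j).map (fun i => String.ofList (rotr^[j - 1 - i] lT)) ++ m.drop j := by
  induction j with
  | zero => intro m lT _; simp [descIdx]
  | succ j ih =>
    intro m lT hm
    rw [descIdx_succ, List.foldl_cons, cimStep_eq]
    have hj : ((j : Int)).toNat = j := by omega
    rw [hj]
    rw [ih (m.set j (String.ofList lT)) (rotr lT) (by simp; omega)]
    rw [drop_set_self m j (String.ofList lT) (by omega)]
    rw [List.range_succ, List.map_append]
    have hmap : (List.range j).map (fun i => String.ofList (rotr^[j - 1 - i] (rotr lT)))
        = (List.range j).map (fun i => String.ofList (rotr^[j + 1 - 1 - i] lT)) := by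
      apply List.map_congr_left
      intro i hi
      have hij : i < j := List.mem_range.mp hi
      rw [← Function.iterate_succ_apply]
      simp only [Nat.succ_eq_add_one]
      have h7 : j - 1 - i + 1 = j + 1 - 1 - i := by omega
      rw [h7]
    rw [hmap]
    simp

theorem cim_main (l : List Char) (hl : 1 ≤ l.length) :
    ((PySem.List.pyRange ((l.length : Int) - 1) (-1) (-1)).foldl cimStep
        ((List.range l.length).map (fun _ => ""), l, String.ofList l)).1
      = (List.range l.length).map (fun i => String.ofList (l.drop (i + 1) ++ l.take (i + 1))) := by
  have ht : ((l.length : Int) - 1 - (-1)).toNat = l.length := by omega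
  rw [PySem.List.pyRange_neg_one, ht]
  rw [show (List.range l.length).map (fun k => ((l.length : Int) - 1) - ↑k) = descIdx l.length from rfl]
  rw [loopA l.length _ l (by simp)]
  rw [List.drop_eq_nil_of_le (by simp), List.append_nil]
  apply List.map_congr_left
  intro i hi
  have hij : i < l.length := List.mem_range.mp hi
  rw [rotr_iter l (l.length - 1 - i) (by omega)]
  have h1 : l.length - (l.length - 1 - i) = i + 1 := by omega
  rw [h1]

-- ===== VERDICT (by name: the statement is the Claim_ definition above) =====
theorem create_index_matrix_spec : Claim_equal_create_index_matrix := by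
  intro seq _
  unfold Spec_create_index_matrix
  simp only [create_index_matrix, create_index_matrix_alt, String.toList_ofList,
    foldl_app_singleton, List.nil_append]
  exact cim_main ('$' :: seq.toList) (by simp)
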